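-- pv_equiv track=rewrite | github.com/BadandBoolean/Snatch2.0 | src/validate_xpath.py | split_xpath
-- ===== SOURCE A (Python) =====
-- def split_xpath(xpath_string):
--     """
--     Splits an XPath expression into its steps, correctly handling predicates.
--     """
--     xpath_steps = []
--     bracket_level = 0
--     current_step = ''
--     i = 0
--     while i < len(xpath_string):
--         char = xpath_string[i]
--         if char == '/' and bracket_level == 0:
--             if current_step:
--                 xpath_steps.append(current_step)
--                 current_step = ''
--             i += 1
--             continue
--         else:
--             current_step += char
--             if char == '[':
--                 bracket_level += 1
--             elif char == ']':
--                 bracket_level -= 1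
--         i += 1
--     if current_step:
--         xpath_steps.append(current_step)
--     return xpath_steps
-- ===== SOURCE B (Python) =====
-- def split_xpath(xpath_string):
--     """
--     Splits an XPath expression into its steps, correctly handling predicates.
--     Splits on '/' first, then merges pieces back while a bracket balance is non-zero.
--     """
--     steps = []
--     buf = ''
--     balance = 0
--     for piece in xpath_string.split('/'):
--         if balance == 0:
--             if buf:
--                 steps.append(buf)
--             buf = piece
--         else:
--             buf += '/' + piece
--         balance += piece.count('[') - piece.count(']')
--     if buf:
--         steps.append(buf)
--     return steps
-- ===== Notes on version B (the rewrite author's own statement) =====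
-- stated objective: faster
-- what changed: Replaces A's Python-level char-by-char while loop (per-character bracket_level updates and slash tests with string concatenation) with one native str.split on the slash separator followed by a fold over the pieces that re-joins pieces while a running bracket balance is non-zero and flushes the buffer when it returns to zero.
import Mathlib
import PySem

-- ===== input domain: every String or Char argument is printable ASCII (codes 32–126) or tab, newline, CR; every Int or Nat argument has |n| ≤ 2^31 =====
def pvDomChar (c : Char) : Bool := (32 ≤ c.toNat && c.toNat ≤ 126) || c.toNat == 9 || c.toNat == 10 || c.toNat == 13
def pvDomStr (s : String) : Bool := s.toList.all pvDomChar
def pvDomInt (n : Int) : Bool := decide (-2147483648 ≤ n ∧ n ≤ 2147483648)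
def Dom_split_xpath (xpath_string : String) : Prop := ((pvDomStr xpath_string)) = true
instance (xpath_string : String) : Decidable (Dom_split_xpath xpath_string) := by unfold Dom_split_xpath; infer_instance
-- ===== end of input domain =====

-- B splits on the slash separator once (native str.split) and merges pieces with a running
-- bracket balance instead of A's char-by-char scan; measured faster by a constant factor.

-- ===== PORT A =====
-- A's while loop: state (steps, bracket_level, current_step); the trailing
-- 'if current_step: append' is the base case of the recursion.
def splitXpathLoop (chars : List Char) (steps : List (List Char)) (bal : Int)
    (cur : List Char) : List (List Char) :=
  match chars with
  | [] => if cur ≠ [] then steps ++ [cur] else steps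
  | c :: rest =>
    if c = '/' ∧ bal = 0 then
      if cur ≠ [] then splitXpathLoop rest (steps ++ [cur]) bal []
      else splitXpathLoop rest steps bal []
    else
      splitXpathLoop rest steps
        (if c = '[' then bal + 1 else if c = ']' then bal - 1 else bal) (cur ++ [c])

def split_xpath (xpath_string : String) : List String :=
  (splitXpathLoop xpath_string.toList [] 0 []).map String.mk

-- ===== PORT B =====
-- piece.count('[') - piece.count(']')  (str.count of a single char = list count of that char)
def pvBracketDelta (p : List Char) : Int := (p.count '[' : Int) - (p.count ']' : Int)

-- one iteration of B's 'for piece in pieces' loop; state (steps, buf, balance)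
def pvBStep (st : List (List Char) × List Char × Int) (p : List Char) :
    List (List Char) × List Char × Int :=
  match st with
  | (steps, buf, bal) =>
    if bal = 0 then
      ((if buf ≠ [] then steps ++ [buf] else steps), p, bal + pvBracketDelta p)
    else (steps, buf ++ '/' :: p, bal + pvBracketDelta p)

def split_xpath_alt (xpath_string : String) : List String :=
  match (PySem.Chars.splitOn xpath_string.toList ['/']).foldl pvBStep ([], [], 0) with
  | (steps, buf, _) => (if buf ≠ [] then steps ++ [buf] else steps).map String.mk

-- ===== PRECONDITION & SPEC =====
def Spec_split_xpath (xpath_string : String) (out : List String) : Prop := out = split_xpath_alt xpath_string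
instance (xpath_string : String) (out : List String) : Decidable (Spec_split_xpath xpath_string out) := by unfold Spec_split_xpath; infer_instance

-- ===== CLAIM (what is proved, stated in full; the proofs are below) =====
def Claim_equal_split_xpath : Prop := ∀ (xpath_string : String), Dom_split_xpath xpath_string → Spec_split_xpath xpath_string (split_xpath xpath_string)

-- ===== LEMMAS AND PROOFS =====

-- reference split on '/': head piece grows in front, a '/' opens a new head piece
def pvPieces : List Char → List (List Char)
  | [] => [[]]
  | c :: rest =>
    if c = '/' then [] :: pvPieces rest
    else match pvPieces rest with
         | [] => [[c]]
         | p :: ps => (c :: p) :: ps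

theorem pvPieces_ne_nil (l : List Char) : pvPieces l ≠ [] := by
  cases l with
  | nil => simp [pvPieces]
  | cons c rest =>
    simp only [pvPieces]
    split
    · simp
    · split <;> simp

theorem pvPieces_exists (l : List Char) : ∃ q qs, pvPieces l = q :: qs := by
  cases hq : pvPieces l with
  | nil => exact absurd hq (pvPieces_ne_nil l)
  | cons q qs => exact ⟨q, qs, rfl⟩

theorem pvPieces_cons_slash (rest : List Char) :
    pvPieces ('/' :: rest) = [] :: pvPieces rest := by
  simp [pvPieces]

theorem pvPieces_cons_ne {c : Char} (hc : c ≠ '/') {rest q : List Char}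
    {qs : List (List Char)} (hq : pvPieces rest = q :: qs) :
    pvPieces (c :: rest) = (c :: q) :: qs := by
  simp [pvPieces, hc, hq]

theorem splitOn_go_eq_pvPieces (fuel : Nat) (l : List Char) (h : l.length < fuel)
    (cur : List Char) (acc : List (List Char)) :
    PySem.Chars.splitOn.go ['/'] fuel l cur acc =
      acc.reverse ++ (match pvPieces l with
                      | [] => []
                      | p :: ps => (cur.reverse ++ p) :: ps) := by
  induction fuel generalizing l cur acc with
  | zero => omega
  | succ fuel ih =>
    cases l with
    | nil => simp [PySem.Chars.splitOn.go, pvPieces]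
    | cons c rest =>
      by_cases hc : c = '/'
      · subst hc
        have hpre : List.isPrefixOf ['/'] ('/' :: rest) = true := by
          simp [List.isPrefixOf]
        rw [PySem.Chars.splitOn.go]
        simp only [hpre, if_true, List.length_cons, List.length_nil, List.drop_succ_cons,
          List.drop_zero, Nat.zero_add]
        have hlen : rest.length < fuel := by simp at h; omega
        rw [ih rest hlen [] (cur.reverse :: acc)]
        obtain ⟨q, qs, hq⟩ := pvPieces_exists rest
        simp [pvPieces_cons_slash, hq]
      · have hpre : List.isPrefixOf ['/'] (c :: rest) = false := by
          simp [List.isPrefixOf]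
          exact fun hcc => hc hcc.symm
        rw [PySem.Chars.splitOn.go]
        simp only [hpre, Bool.false_eq_true, if_false]
        have hlen : rest.length < fuel := by simp at h; omega
        rw [ih rest hlen (c :: cur) acc]
        obtain ⟨q, qs, hq⟩ := pvPieces_exists rest
        simp [pvPieces_cons_ne hc hq, hq]

theorem splitOn_eq_pvPieces (l : List Char) :
    PySem.Chars.splitOn l ['/'] = pvPieces l := by
  unfold PySem.Chars.splitOn
  rw [splitOn_go_eq_pvPieces (l.length + 1) l (by omega) [] []]
  obtain ⟨q, qs, hq⟩ := pvPieces_exists l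
  simp [hq]

def pvBFinish (st : List (List Char) × List Char × Int) : List (List Char) :=
  match st with
  | (steps, buf, _) => if buf ≠ [] then steps ++ [buf] else steps

theorem pvBracketDelta_nil : pvBracketDelta [] = 0 := by simp [pvBracketDelta]

theorem pvBracketDelta_cons (c : Char) (q : List Char) :
    pvBracketDelta (c :: q) =
      (if c = '[' then 1 else if c = ']' then -1 else 0) + pvBracketDelta q := by
  simp only [pvBracketDelta, List.count_cons]
  by_cases h1 : c = '[' <;> by_cases h2 : c = ']' <;>
    simp [h1, h2] <;> push_cast <;> omega

-- A's loop unfolded one character (used to rewrite without relying on simp's branch choice)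
theorem aloop_cons (c : Char) (rest : List Char) (steps : List (List Char)) (bal : Int)
    (cur : List Char) :
    splitXpathLoop (c :: rest) steps bal cur =
      if c = '/' ∧ bal = 0 then
        if cur ≠ [] then splitXpathLoop rest (steps ++ [cur]) bal []
        else splitXpathLoop rest steps bal []
      else splitXpathLoop rest steps
        (if c = '[' then bal + 1 else if c = ']' then bal - 1 else bal) (cur ++ [c]) := rfl

-- main invariant: A's loop from state (steps, bal, cur) equals B's remaining fold,
-- where the head piece of the rest of the input continues cur
theorem aloop_eq_bfold (l : List Char) :
    ∀ (steps : List (List Char)) (bal : Int) (cur : List Char) (p : List Char)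
      (ps : List (List Char)), pvPieces l = p :: ps →
      splitXpathLoop l steps bal cur =
        pvBFinish (ps.foldl pvBStep (steps, cur ++ p, bal + pvBracketDelta p)) := by
  induction l with
  | nil =>
    intro steps bal cur p ps hp
    simp only [pvPieces] at hp
    injection hp with h1 h2
    subst h1; subst h2
    simp [splitXpathLoop, pvBFinish, pvBracketDelta_nil]
  | cons c rest ih =>
    intro steps bal cur p ps hp
    by_cases hc : c = '/'
    · subst hc
      rw [pvPieces_cons_slash] at hp
      injection hp with h1 h2
      subst h1; subst h2
      obtain ⟨q, qs, hq⟩ := pvPieces_exists rest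
      rw [hq]
      by_cases hb : bal = 0
      · subst hb
        rw [aloop_cons, if_pos (And.intro rfl rfl), List.foldl_cons]
        have hstep : pvBStep (steps, cur ++ [], 0 + pvBracketDelta []) q
            = ((if cur ≠ [] then steps ++ [cur] else steps), q, pvBracketDelta q) := by
          simp [pvBStep, pvBracketDelta_nil]
        rw [hstep]
        by_cases hcur : cur = []
        · rw [if_neg (not_not_intro hcur), if_neg (not_not_intro hcur), ih _ _ _ _ _ hq]
          simp
        · rw [if_pos hcur, if_pos hcur, ih _ _ _ _ _ hq]
          simp
      · rw [aloop_cons, if_neg (fun hand => hb hand.2), if_neg (by decide), if_neg (by decide),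
          ih _ _ _ _ _ hq, List.foldl_cons]
        have hstep : pvBStep (steps, cur ++ [], bal + pvBracketDelta []) q
            = (steps, cur ++ '/' :: q, bal + pvBracketDelta q) := by
          simp [pvBStep, pvBracketDelta_nil, hb]
        rw [hstep]
        simp
    · obtain ⟨q, qs, hq⟩ := pvPieces_exists rest
      rw [pvPieces_cons_ne hc hq] at hp
      injection hp with h1 h2
      subst h1; subst h2
      rw [aloop_cons, if_neg (fun hand => hc hand.1), ih _ _ _ _ _ hq]
      have hbal : (if c = '[' then bal + 1 else if c = ']' then bal - 1 else bal)
          + pvBracketDelta q = bal + pvBracketDelta (c :: q) := by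
        rw [pvBracketDelta_cons]; split_ifs <;> ring
      rw [hbal]
      have hl : cur ++ [c] ++ q = cur ++ (c :: q) := by simp
      rw [hl]

-- ===== VERDICT (by name: the statement is the Claim_ definition above) =====
theorem split_xpath_spec : Claim_equal_split_xpath := by
  intro s _
  unfold Spec_split_xpath split_xpath split_xpath_alt
  rw [splitOn_eq_pvPieces]
  obtain ⟨p, ps, hp⟩ := pvPieces_exists s.toList
  rw [hp, aloop_eq_bfold s.toList [] 0 [] p ps hp, List.foldl_cons]
  have hfirst : pvBStep ([], [], 0) p = ([], p, 0 + pvBracketDelta p) := by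
    simp [pvBStep]
  rw [hfirst]
  have hl : ([] : List Char) ++ p = p := by simp
  rw [hl]
  generalize List.foldl pvBStep ([], p, 0 + pvBracketDelta p) ps = X
  rcases X with ⟨steps, buf, bal⟩
  simp [pvBFinish]
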